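-- pv_equiv track=rewrite | github.com/elnarabzhakhanov/SteppeDNA | data_pipelines/fetch_alphafold.py | get_secondary_structure
-- ===== SOURCE A (Python) =====
-- HELIX_REGIONS = [(2404, 2468), (2530, 2555), (2590, 2622), (2635, 2665),
--                  (2805, 2830), (2840, 2870), (2875, 2895)]
--
-- STRAND_REGIONS = [(2680, 2690), (2720, 2730), (2745, 2755), (2765, 2775),
--                   (2785, 2800), (2910, 2920), (2933, 2943), (2955, 2965),
--                   (2975, 2990), (3010, 3020), (3035, 3045), (3055, 3065),
--                   (3075, 3085), (3090, 3100)]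
--
-- BRC_HELIX = []
--
-- def get_secondary_structure(pos):
--     """Assign secondary structure based on curated data."""
--     for start, end in HELIX_REGIONS + BRC_HELIX:
--         if start <= pos <= end:
--             return "H"
--     for start, end in STRAND_REGIONS:
--         if start <= pos <= end:
--             return "E"
--     return "C"
-- ===== SOURCE B (Python) =====
-- import bisect
--
-- HELIX_REGIONS = [(2404, 2468), (2530, 2555), (2590, 2622), (2635, 2665),
--                  (2805, 2830), (2840, 2870), (2875, 2895)]
--
-- STRAND_REGIONS = [(2680, 2690), (2720, 2730), (2745, 2755), (2765, 2775),
--                   (2785, 2800), (2910, 2920), (2933, 2943), (2955, 2965),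
--                   (2975, 2990), (3010, 3020), (3035, 3045), (3055, 3065),
--                   (3075, 3085), (3090, 3100)]
--
-- # One sorted table of disjoint intervals; lookup is a binary search.
-- _SS_TABLE = sorted([(s, e, "H") for s, e in HELIX_REGIONS] +
--                    [(s, e, "E") for s, e in STRAND_REGIONS])
-- _STARTS = [s for s, _, _ in _SS_TABLE]
--
--
-- def get_secondary_structure(pos):
--     """Assign secondary structure based on curated data."""
--     i = bisect.bisect_right(_STARTS, pos) - 1
--     if i >= 0 and pos <= _SS_TABLE[i][1]:
--         return _SS_TABLE[i][2]
--     return "C"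
-- ===== Notes on version B (the rewrite author's own statement) =====
-- stated objective: idiomatic
-- what changed: Replaces A's two sequential linear scans over the helix and strand region lists by one module-level sorted table of disjoint (start, end, label) intervals queried with a bisect_right binary search.
import Mathlib
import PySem

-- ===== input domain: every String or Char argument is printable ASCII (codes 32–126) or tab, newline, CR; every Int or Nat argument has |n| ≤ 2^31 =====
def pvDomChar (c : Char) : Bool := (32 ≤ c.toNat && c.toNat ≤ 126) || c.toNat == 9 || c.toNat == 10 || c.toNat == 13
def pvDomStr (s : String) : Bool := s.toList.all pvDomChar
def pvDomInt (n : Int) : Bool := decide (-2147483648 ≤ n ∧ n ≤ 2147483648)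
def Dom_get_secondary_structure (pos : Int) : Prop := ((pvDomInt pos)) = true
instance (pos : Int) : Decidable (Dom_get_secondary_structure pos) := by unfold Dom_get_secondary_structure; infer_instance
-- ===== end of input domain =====

-- B replaces A's two sequential linear scans by one module-level sorted interval
-- table queried with a bisect_right binary search (objective: idiomatic).

-- ===== PORT A =====
def HELIX_REGIONS : List (Int × Int) :=
  [(2404, 2468), (2530, 2555), (2590, 2622), (2635, 2665),
   (2805, 2830), (2840, 2870), (2875, 2895)]

def STRAND_REGIONS : List (Int × Int) :=
  [(2680, 2690), (2720, 2730), (2745, 2755), (2765, 2775),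
   (2785, 2800), (2910, 2920), (2933, 2943), (2955, 2965),
   (2975, 2990), (3010, 3020), (3035, 3045), (3055, 3065),
   (3075, 3085), (3090, 3100)]

def BRC_HELIX : List (Int × Int) := []

-- A's 'for start, end in regions: if start <= pos <= end: return lab' loop
def scanRegions (pos : Int) (regs : List (Int × Int)) (lab : String) : Option String :=
  match regs with
  | [] => none
  | (s, e) :: rest => if s ≤ pos ∧ pos ≤ e then some lab else scanRegions pos rest lab

def get_secondary_structure (pos : Int) : String :=
  match scanRegions pos (HELIX_REGIONS ++ BRC_HELIX) "H" with
  | some r => r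
  | none =>
    match scanRegions pos STRAND_REGIONS "E" with
    | some r => r
    | none => "C"

-- ===== PORT B =====
-- module-level sorted table of disjoint intervals (Python: _SS_TABLE)
def ssTable : List (Int × Int × String) :=
  [(2404, 2468, "H"),
   (2530, 2555, "H"),
   (2590, 2622, "H"),
   (2635, 2665, "H"),
   (2680, 2690, "E"),
   (2720, 2730, "E"),
   (2745, 2755, "E"),
   (2765, 2775, "E"),
   (2785, 2800, "E"),
   (2805, 2830, "H"),
   (2840, 2870, "H"),
   (2875, 2895, "H"),
   (2910, 2920, "E"),
   (2933, 2943, "E"),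
   (2955, 2965, "E"),
   (2975, 2990, "E"),
   (3010, 3020, "E"),
   (3035, 3045, "E"),
   (3055, 3065, "E"),
   (3075, 3085, "E"),
   (3090, 3100, "E")]

-- Python: _STARTS
def ssStarts : List Int := ssTable.map (fun t => t.1)

-- CPython's 'while lo < hi' loop of bisect.bisect_right, with an explicit fuel
-- (the interval [lo, hi) shrinks every iteration, so fuel = hi - lo suffices)
def bisectLoop (a : List Int) (x : Int) : Nat → Nat → Nat → Nat
  | 0, lo, _ => lo
  | fuel + 1, lo, hi =>
    if lo < hi then
      let mid := (lo + hi) / 2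
      if x < a.getD mid 0 then bisectLoop a x fuel lo mid
      else bisectLoop a x fuel (mid + 1) hi
    else lo

def bisectRight (a : List Int) (x : Int) (lo hi : Nat) : Nat :=
  bisectLoop a x (hi - lo) lo hi

def get_secondary_structure_alt (pos : Int) : String :=
  let i : Int := (bisectRight ssStarts pos 0 ssStarts.length : Int) - 1
  if i ≥ 0 ∧ pos ≤ (ssTable.getD i.toNat (0, 0, "C")).2.1 then
    (ssTable.getD i.toNat (0, 0, "C")).2.2
  else "C"

-- ===== PRECONDITION & SPEC =====
def Spec_get_secondary_structure (pos : Int) (out : String) : Prop := out = get_secondary_structure_alt pos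
instance (pos : Int) (out : String) : Decidable (Spec_get_secondary_structure pos out) := by unfold Spec_get_secondary_structure; infer_instance

-- ===== CLAIM (what is proved, stated in full; the proofs are below) =====
def Claim_equal_get_secondary_structure : Prop := ∀ (pos : Int), Dom_get_secondary_structure pos → Spec_get_secondary_structure pos (get_secondary_structure pos)

-- ===== LEMMAS AND PROOFS =====

-- if x is below every table entry of [lo, hi), the search returns lo
theorem bisectLoop_all_lt (a : List Int) (x : Int) :
    ∀ (fuel lo hi : Nat), (∀ i, lo ≤ i → i < hi → x < a.getD i 0) →
      bisectLoop a x fuel lo hi = lo := by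
  intro fuel
  induction fuel with
  | zero => intro lo hi _; rfl
  | succ n ih =>
    intro lo hi h
    by_cases hlt : lo < hi
    · have hmid : x < a.getD ((lo + hi) / 2) 0 := h _ (by omega) (by omega)
      simp only [bisectLoop, if_pos hlt, if_pos hmid]
      exact ih lo ((lo + hi) / 2) (fun i h1 h2 => h i h1 (by omega))
    · simp only [bisectLoop, if_neg hlt]

-- if x is at or above every table entry of [lo, hi), the search returns hi
theorem bisectLoop_all_ge (a : List Int) (x : Int) :
    ∀ (fuel lo hi : Nat), hi - lo ≤ fuel → lo ≤ hi →
      (∀ i, lo ≤ i → i < hi → a.getD i 0 ≤ x) →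
      bisectLoop a x fuel lo hi = hi := by
  intro fuel
  induction fuel with
  | zero =>
    intro lo hi h1 h2 _
    have h3 : lo = hi := by omega
    exact h3
  | succ n ih =>
    intro lo hi h1 h2 h
    by_cases hlt : lo < hi
    · have hmid : ¬ x < a.getD ((lo + hi) / 2) 0 := by
        have := h ((lo + hi) / 2) (by omega) (by omega); omega
      simp only [bisectLoop, if_pos hlt, if_neg hmid]
      exact ih ((lo + hi) / 2 + 1) hi (by omega) (by omega)
        (fun i h1' h2' => h i (by omega) h2')
    · have h3 : lo = hi := by omega
      subst h3
      simp only [bisectLoop, if_neg hlt]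

theorem alt_low (pos : Int) (h : pos < 2404) : get_secondary_structure_alt pos = "C" := by
  unfold get_secondary_structure_alt
  have hb : bisectRight ssStarts pos 0 ssStarts.length = 0 := by
    apply bisectLoop_all_lt
    intro i _ h2
    have h21 : i < 21 := by simpa [ssStarts, ssTable] using h2
    have : (2404 : Int) ≤ ssStarts.getD i 0 := by
      interval_cases i <;> simp [ssStarts, ssTable]
    omega
  rw [hb]
  norm_num

theorem alt_high (pos : Int) (h : 3100 < pos) : get_secondary_structure_alt pos = "C" := by
  unfold get_secondary_structure_alt
  have hb : bisectRight ssStarts pos 0 ssStarts.length = 21 := by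
    have hl : ssStarts.length = 21 := by simp [ssStarts, ssTable]
    rw [hl]
    apply bisectLoop_all_ge _ _ _ _ _ (by omega) (by omega)
    intro i _ h2
    have : ssStarts.getD i 0 ≤ 3090 := by
      interval_cases i <;> simp [ssStarts, ssTable]
    omega
  rw [hb]
  norm_num [ssTable, List.getD, Int.toNat]
  omega

-- the scan returns none when no region of the list contains pos
theorem scan_none (pos : Int) (lab : String) :
    ∀ regs, (∀ p ∈ regs, ¬ (p.1 ≤ pos ∧ pos ≤ p.2)) → scanRegions pos regs lab = none := by
  intro regs
  induction regs with
  | nil => intro _; rfl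
  | cons hd tl ih =>
    intro h
    obtain ⟨s, e⟩ := hd
    rw [scanRegions, if_neg (h (s, e) (by simp))]
    exact ih (fun p hp => h p (by simp [hp]))

theorem a_out (pos : Int) (h : pos < 2404 ∨ 3100 < pos) : get_secondary_structure pos = "C" := by
  unfold get_secondary_structure
  rw [scan_none pos "H" (HELIX_REGIONS ++ BRC_HELIX)
        (by intro p hp; fin_cases hp <;> simp <;> omega),
      scan_none pos "E" STRAND_REGIONS
        (by intro p hp; fin_cases hp <;> simp <;> omega)]

-- ===== VERDICT (by name: the statement is the Claim_ definition above) =====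
set_option maxRecDepth 100000 in
set_option maxHeartbeats 4000000 in
theorem get_secondary_structure_spec : Claim_equal_get_secondary_structure := by
  intro pos _
  unfold Spec_get_secondary_structure
  by_cases hlo : pos < 2404
  · rw [alt_low pos hlo, a_out pos (Or.inl hlo)]
  · by_cases hhi : 3100 < pos
    · rw [alt_high pos hhi, a_out pos (Or.inr hhi)]
    · have h1 : 2404 ≤ pos := by omega
      have h2 : pos ≤ 3100 := by omega
      interval_cases pos <;> decide
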